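-- pv_equiv track=rewrite | github.com/goaziz/leetcode | Easy/put_apples_into_basket_1196.py | maxNumberOfApples
-- ===== SOURCE A (Python) =====
-- from typing import List
--
-- def maxNumberOfApples(weight: List[int]) -> int:
--     weight.sort()
--     apple_count = 0
--     weight_sum = 0
--
--     for w in weight:
--         weight_sum += w
--         if weight_sum > 5000:
--             break
--         apple_count += 1
--
--     return apple_count
-- ===== SOURCE B (Python) =====
-- from bisect import bisect_right
-- from itertools import accumulate
--
-- def maxNumberOfApples(weight):
--     weight.sort()
--     prefix = list(accumulate(weight))
--     return bisect_right(prefix, 5000)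
-- ===== Notes on version B (the rewrite author's own statement) =====
-- stated objective: alternative
-- what changed: Replaces the counting loop with break by a two-stage computation: build the prefix-sum table with itertools.accumulate, then binary-search (bisect_right) for the largest count whose cumulative weight stays <= 5000; weight is still sorted in place.
import Mathlib
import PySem

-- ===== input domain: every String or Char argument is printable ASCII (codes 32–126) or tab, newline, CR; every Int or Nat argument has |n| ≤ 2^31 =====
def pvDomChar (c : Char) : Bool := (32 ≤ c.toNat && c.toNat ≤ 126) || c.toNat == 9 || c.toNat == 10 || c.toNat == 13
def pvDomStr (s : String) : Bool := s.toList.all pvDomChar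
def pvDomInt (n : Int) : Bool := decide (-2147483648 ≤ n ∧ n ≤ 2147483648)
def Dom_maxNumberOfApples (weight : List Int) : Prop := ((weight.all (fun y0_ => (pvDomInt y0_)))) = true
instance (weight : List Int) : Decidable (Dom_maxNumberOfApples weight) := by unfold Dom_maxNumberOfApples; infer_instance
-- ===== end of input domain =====

-- B computes the answer by building the prefix-sum table and binary-searching
-- (bisect_right) for the boundary, instead of A's counting loop with break;
-- same O(n log n) cost, a different algorithm. Both Pythons sort the argument
-- in place; the equivalence proved here is about the return value.


-- ===== PORT A =====
-- the for-loop with break: state is (apple_count, weight_sum)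
def maxNumberOfApplesLoop : List Int → Int → Int → Int
  | [], appleCount, _ => appleCount
  | w :: ws, appleCount, weightSum =>
      let weightSum' := weightSum + w
      if weightSum' > 5000 then appleCount
      else maxNumberOfApplesLoop ws (appleCount + 1) weightSum'

def maxNumberOfApples (weight : List Int) : Int :=
  maxNumberOfApplesLoop (PySem.List.sorted weight (fun x => x) false) 0 0

-- ===== PORT B =====
-- itertools.accumulate: the running prefix sums (carry = sum so far)
def accumB (carry : Int) : List Int → List Int
  | [] => []
  | w :: ws => (carry + w) :: accumB (carry + w) ws

-- bisect.bisect_right is PySem.List.bisectRight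
def maxNumberOfApples_alt (weight : List Int) : Int :=
  Int.ofNat
    (PySem.List.bisectRight (accumB 0 (PySem.List.sorted weight (fun x => x) false)) 5000)

-- ===== PRECONDITION & SPEC =====
def Spec_maxNumberOfApples (weight : List Int) (out : Int) : Prop := out = maxNumberOfApples_alt weight
instance (weight : List Int) (out : Int) : Decidable (Spec_maxNumberOfApples weight out) := by unfold Spec_maxNumberOfApples; infer_instance

-- ===== CLAIM (what is proved, stated in full; the proofs are below) =====
def Claim_equal_maxNumberOfApples : Prop := ∀ (weight : List Int), Dom_maxNumberOfApples weight → Spec_maxNumberOfApples weight (maxNumberOfApples weight)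

-- ===== LEMMAS AND PROOFS =====

-- A's loop counts the prefix sums that stay ≤ 5000 (up to the first that does not)
theorem loop_eq_takeWhile (ws : List Int) : ∀ (cnt s : Int),
    maxNumberOfApplesLoop ws cnt s
      = cnt + ((accumB s ws).takeWhile (fun t => t ≤ 5000)).length := by
  induction ws with
  | nil => intro cnt s; simp [maxNumberOfApplesLoop, accumB]
  | cons w ws ih =>
      intro cnt s
      simp only [maxNumberOfApplesLoop, accumB, List.takeWhile]
      by_cases h : s + w > 5000
      · simp [h, show ¬ (s + w ≤ 5000) by omega]
      · simp only [if_neg h, show decide (s + w ≤ 5000) = true by simp; omega,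
          List.length_cons, ih]
        push_cast
        ring

theorem accumB_length (ws : List Int) : ∀ c, (accumB c ws).length = ws.length := by
  induction ws with
  | nil => intro c; simp [accumB]
  | cons w ws ih => intro c; simp [accumB, ih]

-- entries of the prefix-sum list
theorem accumB_getD (ws : List Int) : ∀ c i, i < ws.length →
    (accumB c ws).getD i 0 = c + (ws.take (i + 1)).sum := by
  induction ws with
  | nil => intro c i h; simp at h
  | cons w ws ih =>
      intro c i h
      cases i with
      | zero => simp [accumB]
      | succ i =>
          simp only [accumB, List.getD_cons_succ, List.take_succ_cons, List.sum_cons]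
          rw [ih (c + w) i (by simpa using h)]
          ring

-- boundary characterisation of takeWhile's length
theorem takeWhile_boundary (a : List Int) :
    ((a.takeWhile (fun t => t ≤ 5000)).length ≤ a.length) ∧
    (∀ i < (a.takeWhile (fun t => t ≤ 5000)).length, a.getD i 0 ≤ 5000) ∧
    ((a.takeWhile (fun t => t ≤ 5000)).length < a.length →
      ¬ a.getD (a.takeWhile (fun t => t ≤ 5000)).length 0 ≤ 5000) := by
  induction a with
  | nil => simp
  | cons x xs ih =>
      by_cases hx : x ≤ 5000
      · obtain ⟨h1, h2, h3⟩ := ih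
        refine ⟨?_, ?_, ?_⟩
        · simp only [List.takeWhile_cons, hx, decide_true, if_true, List.length_cons]
          omega
        · intro i hi
          simp only [List.takeWhile_cons, hx, decide_true, if_true, List.length_cons] at hi
          cases i with
          | zero => simpa using hx
          | succ i => simpa using h2 i (by omega)
        · intro hlt
          simp only [List.takeWhile_cons, hx, decide_true, if_true, List.length_cons] at hlt ⊢
          simpa using h3 (by omega)
      · refine ⟨?_, ?_, ?_⟩
        · simp [hx]
        · intro i hi; simp [hx] at hi
        · intro _; simp [hx]

-- on a sorted list, once a prefix sum exceeds 5000 every later one does too: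
-- the next element is ≥ 0 (else all earlier elements are negative, so the sum is < 0)
theorem mono_step (ws : List Int) (hs : ws.Pairwise (· ≤ ·)) (j : Nat)
    (hj : j + 1 < ws.length) (h : ¬ (accumB 0 ws).getD j 0 ≤ 5000) :
    ¬ (accumB 0 ws).getD (j + 1) 0 ≤ 5000 := by
  rw [accumB_getD ws 0 j (by omega)] at h
  rw [accumB_getD ws 0 (j + 1) hj]
  have htake : ws.take (j + 2) = ws.take (j + 1) ++ [ws[j + 1]] := by
    rw [List.take_add_one]
    simp [List.getElem?_eq_getElem hj]
  rw [htake, List.sum_append, List.sum_cons, List.sum_nil]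
  by_cases hw : (0 : Int) ≤ ws[j + 1]
  · omega
  · -- all elements of the prefix are ≤ ws[j+1] < 0, so its sum is ≤ 0: contradiction
    exfalso
    have hpair := List.pairwise_iff_getElem.mp hs
    have hbound : ∀ x ∈ ws.take (j + 1), x ≤ ws[j + 1] := by
      intro x hx
      obtain ⟨i, hi, hig⟩ := List.mem_iff_getElem.mp hx
      have hlt : i < j + 1 := by
        have := List.length_take_le (j + 1) ws
        omega
      rw [List.getElem_take] at hig
      exact hig ▸ hpair i (j + 1) (by omega) hj hlt
    have hsum := List.sum_le_card_nsmul (ws.take (j + 1)) ws[j + 1] hbound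
    have hlen : (ws.take (j + 1)).length = j + 1 := by
      rw [List.length_take]; omega
    rw [hlen, nsmul_eq_mul] at hsum
    have hprod : ((j + 1 : Nat) : Int) * ws[j + 1] ≤ 0 :=
      mul_nonpos_of_nonneg_of_nonpos (by positivity) (by omega)
    have h' : (ws.take (j + 1)).sum > 5000 := by omega
    linarith

-- monotone predicate on prefix sums of a sorted list
theorem mono_acc (ws : List Int) (hs : ws.Pairwise (· ≤ ·)) :
    ∀ i j, i ≤ j → j < (accumB 0 ws).length →
      (accumB 0 ws).getD j 0 ≤ 5000 → (accumB 0 ws).getD i 0 ≤ 5000 := by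
  intro i j hij hj hP
  by_contra hnP
  rw [accumB_length] at hj
  have : ∀ k, i ≤ k → k < ws.length → ¬ (accumB 0 ws).getD k 0 ≤ 5000 := by
    intro k hk
    induction k with
    | zero => intro hlen; have : i = 0 := by omega
              subst this; exact fun h => hnP h
    | succ k ihk =>
        intro hlen
        rcases Nat.lt_or_ge i (k + 1) with hlt | hge
        · have hkk : i ≤ k := by omega
          exact mono_step ws hs k hlen (ihk hkk (by omega))
        · have : i = k + 1 := by omega
          subst this; exact fun h => hnP h
  exact this j hij hj hP

-- binary-search loop: with a monotone predicate it lands exactly on the boundary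
theorem bisectLoop_boundary (a : List Int)
    (hmono : ∀ i j, i ≤ j → j < a.length → a.getD j 0 ≤ 5000 → a.getD i 0 ≤ 5000) :
    ∀ (fuel lo hi : Nat), lo ≤ hi → hi ≤ a.length → hi - lo ≤ fuel →
      (∀ i < lo, a.getD i 0 ≤ 5000) →
      (∀ i, hi ≤ i → i < a.length → ¬ a.getD i 0 ≤ 5000) →
      (∀ i < PySem.List.bisectRightLoop a 5000 fuel lo hi, a.getD i 0 ≤ 5000) ∧
      (∀ i, PySem.List.bisectRightLoop a 5000 fuel lo hi ≤ i → i < a.length →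
        ¬ a.getD i 0 ≤ 5000) ∧
      PySem.List.bisectRightLoop a 5000 fuel lo hi ≤ a.length := by
  intro fuel
  induction fuel with
  | zero =>
      intro lo hi h1 h2 h3 hlow hhigh
      have : lo = hi := by omega
      subst this
      have hstop : PySem.List.bisectRightLoop a 5000 0 lo lo = lo := by
        simp [PySem.List.bisectRightLoop]
      rw [hstop]
      exact ⟨hlow, hhigh, h2⟩
  | succ fuel ih =>
      intro lo hi h1 h2 h3 hlow hhigh
      by_cases hlh : lo < hi
      · have hmidlt : (lo + hi) / 2 < a.length := by omega
        have hget : a[(lo + hi) / 2]? = some (a.getD ((lo + hi) / 2) 0) := by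
          rw [List.getD_eq_getElem _ _ hmidlt, List.getElem?_eq_getElem hmidlt]
        by_cases hp : a.getD ((lo + hi) / 2) 0 ≤ 5000
        · have : PySem.List.bisectRightLoop a 5000 (fuel + 1) lo hi
              = PySem.List.bisectRightLoop a 5000 fuel ((lo + hi) / 2 + 1) hi := by
            simp only [PySem.List.bisectRightLoop, if_pos hlh, hget,
              if_neg (show ¬ (5000 : Int) < a.getD ((lo + hi) / 2) 0 by omega)]
          rw [this]
          refine ih ((lo + hi) / 2 + 1) hi (by omega) h2 (by omega) ?_ hhigh
          intro i hi'
          exact hmono i ((lo + hi) / 2) (by omega) hmidlt hp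
        · have : PySem.List.bisectRightLoop a 5000 (fuel + 1) lo hi
              = PySem.List.bisectRightLoop a 5000 fuel lo ((lo + hi) / 2) := by
            simp only [PySem.List.bisectRightLoop, if_pos hlh, hget,
              if_pos (show (5000 : Int) < a.getD ((lo + hi) / 2) 0 by omega)]
          rw [this]
          refine ih lo ((lo + hi) / 2) (by omega) (by omega) (by omega) hlow ?_
          intro i hmi hil hPi
          exact hp (hmono ((lo + hi) / 2) i hmi hil hPi)
      · have : lo = hi := by omega
        subst this
        have hstop : PySem.List.bisectRightLoop a 5000 (fuel + 1) lo lo = lo := by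
          simp [PySem.List.bisectRightLoop]
        rw [hstop]
        exact ⟨hlow, hhigh, h2⟩

-- boundary points are unique: bisect_right = takeWhile length
theorem bisect_eq_takeWhile (a : List Int)
    (hmono : ∀ i j, i ≤ j → j < a.length → a.getD j 0 ≤ 5000 → a.getD i 0 ≤ 5000) :
    PySem.List.bisectRight a 5000 = (a.takeWhile (fun t => t ≤ 5000)).length := by
  obtain ⟨t1, t2, t3⟩ := takeWhile_boundary a
  obtain ⟨b1, b2, b3⟩ := bisectLoop_boundary a hmono a.length 0 a.length
    (by omega) (le_refl _) (by omega) (by omega) (by omega)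
  set r := PySem.List.bisectRightLoop a 5000 a.length 0 a.length with hr
  show r = _
  rcases Nat.lt_trichotomy r (a.takeWhile (fun t => t ≤ 5000)).length with h | h | h
  · exact absurd (t2 r h) (b2 r (le_refl _) (by omega))
  · exact h
  · exact absurd (b1 _ h) (by
      have := t3 (by omega)
      simpa using this)
  
-- ===== VERDICT (by name: the statement is the Claim_ definition above) =====
theorem maxNumberOfApples_spec : Claim_equal_maxNumberOfApples := by
  intro weight _
  unfold Spec_maxNumberOfApples maxNumberOfApples maxNumberOfApples_alt
  set s := PySem.List.sorted weight (fun x => x) false with hsdef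
  have hs : s.Pairwise (· ≤ ·) := by
    simpa using PySem.List.sorted_pairwise weight (fun x => x)
  have hmono := mono_acc s hs
  rw [loop_eq_takeWhile, bisect_eq_takeWhile (accumB 0 s) hmono]
  simp
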